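-- pv_equiv track=rewrite | github.com/yangqinue/hpaa | src/gen_HPAA.py | _format_s_precomposed
-- ===== SOURCE A (Python) =====
-- def _format_s_precomposed(c):
--     if c.isupper():
--         c = c.lower()
--     precomposed_letters = {
--         **{c: chr(0x24B6 + i) for i, c in enumerate("ABCDEFGHIJKLMNOPQRSTUVWXYZ")},
--         **{c: chr(0x24D0 + i) for i, c in enumerate("abcdefghijklmnopqrstuvwxyz")},
--     }
--     return precomposed_letters.get(c, c)
-- ===== SOURCE B (Python) =====
-- def _format_s_precomposed(c):
--     if c.isupper():
--         c = c.lower()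
--     if len(c) == 1 and 'a' <= c <= 'z':
--         return chr(0x24D0 + ord(c) - ord('a'))
--     return c
-- ===== Notes on version B (the rewrite author's own statement) =====
-- stated objective: simpler
-- what changed: Replaces the 52-entry precomputed dict and its .get lookup with a direct closed-form codepoint computation (offset from the circled-letter block) guarded by a single-lowercase-letter test.
import Mathlib
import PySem

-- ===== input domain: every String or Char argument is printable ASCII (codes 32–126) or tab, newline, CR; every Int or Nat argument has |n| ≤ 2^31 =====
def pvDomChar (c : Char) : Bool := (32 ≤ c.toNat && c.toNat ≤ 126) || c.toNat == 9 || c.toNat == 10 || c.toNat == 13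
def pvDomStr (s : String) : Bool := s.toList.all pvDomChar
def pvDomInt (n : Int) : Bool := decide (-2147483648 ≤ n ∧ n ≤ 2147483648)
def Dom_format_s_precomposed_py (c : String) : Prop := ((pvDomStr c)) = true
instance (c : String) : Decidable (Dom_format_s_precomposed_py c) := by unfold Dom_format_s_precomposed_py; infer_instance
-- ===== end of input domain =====

set_option maxRecDepth 40000
set_option maxHeartbeats 1000000


-- B replaces A's 52-entry dict with a closed-form codepoint computation (objective: simpler).

-- hand port of Python str.isupper() (exact on the ASCII domain: some cased char exists
-- and no lowercase char occurs; ASCII cased characters are exactly the letters)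
def pyStrIsupper (s : String) : Bool :=
  s.toList.any PySem.Chars.isalpha && s.toList.all (fun ch => !(PySem.Chars.islower ch))

-- ===== PORT A =====
def format_s_precomposed_py (c : String) : String :=
  let c := if pyStrIsupper c then PySem.Str.lower c else c
  let precomposed_letters : PySem.Dict String String :=
    PySem.Dict.ofList
      ((PySem.List.enumerate "ABCDEFGHIJKLMNOPQRSTUVWXYZ".toList).map
        (fun p => (String.ofList [p.2], String.ofList [Char.ofNat (0x24B6 + p.1).toNat]))
       ++ (PySem.List.enumerate "abcdefghijklmnopqrstuvwxyz".toList).map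
        (fun p => (String.ofList [p.2], String.ofList [Char.ofNat (0x24D0 + p.1).toNat])))
  precomposed_letters.getD c c

-- ===== PORT B =====
def format_s_precomposed_py_alt (c : String) : String :=
  let c := if pyStrIsupper c then PySem.Str.lower c else c
  -- 'a' <= c <= 'z': under len(c) == 1 (checked first; `and` short-circuits) this string
  -- comparison is exactly the comparison of the single code point, ported as such
  if PySem.Str.len c = 1 ∧ 'a' ≤ c.toList.headD 'a' ∧ c.toList.headD 'a' ≤ 'z' then
    -- chr(0x24D0 + ord(c) - ord('a')); ord(c) on the length-1 string is its only char
    String.ofList [Char.ofNat (0x24D0 + (c.toList.headD 'a').toNat - 97)]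
  else c

-- ===== PRECONDITION & SPEC =====
def Spec_format_s_precomposed_py (c : String) (out : String) : Prop := out = format_s_precomposed_py_alt c
instance (c : String) (out : String) : Decidable (Spec_format_s_precomposed_py c out) := by unfold Spec_format_s_precomposed_py; infer_instance

-- ===== CLAIM (what is proved, stated in full; the proofs are below) =====
def Claim_equal_format_s_precomposed_py : Prop := ∀ (c : String), Dom_format_s_precomposed_py c → Spec_format_s_precomposed_py c (format_s_precomposed_py c)

-- ===== LEMMAS AND PROOFS =====

-- the dict A builds, as a standalone constant for the lemmas
def pvDictA : PySem.Dict String String :=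
  PySem.Dict.ofList
    ((PySem.List.enumerate "ABCDEFGHIJKLMNOPQRSTUVWXYZ".toList).map
      (fun p => (String.ofList [p.2], String.ofList [Char.ofNat (0x24B6 + p.1).toNat]))
     ++ (PySem.List.enumerate "abcdefghijklmnopqrstuvwxyz".toList).map
      (fun p => (String.ofList [p.2], String.ofList [Char.ofNat (0x24D0 + p.1).toNat])))

lemma dictA_keys_len : ∀ k ∈ pvDictA.keys, k.toList.length = 1 := by decide

lemma getD_not_single (s : String) (h : s.toList.length ≠ 1) :
    pvDictA.getD s s = s := by
  apply PySem.Dict.getD_of_not_contains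
  rw [PySem.Dict.contains_eq_decide_mem_keys]
  simp only [decide_eq_false_iff_not]
  intro hm
  exact h (dictA_keys_len s hm)

-- single lowercase-letter key: the lookup returns the circled letter
lemma single_lower_eq : ∀ n : Fin 127, 97 ≤ n.val → n.val ≤ 122 →
    pvDictA.getD (String.ofList [Char.ofNat n.val]) (String.ofList [Char.ofNat n.val]) =
    String.ofList [Char.ofNat (0x24D0 + n.val - 97)] := by decide

-- single char that is neither an ASCII uppercase nor lowercase letter: not a key
lemma single_other_eq : ∀ n : Fin 127, ¬(65 ≤ n.val ∧ n.val ≤ 90) → ¬(97 ≤ n.val ∧ n.val ≤ 122) →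
    pvDictA.getD (String.ofList [Char.ofNat n.val]) (String.ofList [Char.ofNat n.val]) =
    String.ofList [Char.ofNat n.val] := by decide

lemma char_le_iff (a b : Char) : a ≤ b ↔ a.toNat ≤ b.toNat := by
  rw [Char.le_def, UInt32.le_iff_toNat_le]; rfl

lemma upper_isupper : ∀ n : Fin 127, 65 ≤ n.val → n.val ≤ 90 →
    (PySem.Chars.isalpha (Char.ofNat n.val) && !PySem.Chars.islower (Char.ofNat n.val)) = true := by
  decide

-- Dom chars keep code < 127 after lowering, and lowerChar output is never an uppercase letter
lemma lowerChar_fin : ∀ n : Fin 127,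
    (PySem.Chars.lowerChar (Char.ofNat n.val)).toNat < 127 ∧
    ¬(65 ≤ (PySem.Chars.lowerChar (Char.ofNat n.val)).toNat ∧ (PySem.Chars.lowerChar (Char.ofNat n.val)).toNat ≤ 90) := by decide

lemma dom_char_lt (ch : Char) (h : pvDomChar ch = true) : ch.toNat < 127 := by
  simp [pvDomChar] at h; omega

lemma lowerChar_facts (ch : Char) (h : pvDomChar ch = true) :
    (PySem.Chars.lowerChar ch).toNat < 127 ∧
    ¬(65 ≤ (PySem.Chars.lowerChar ch).toNat ∧ (PySem.Chars.lowerChar ch).toNat ≤ 90) := by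
  have hlt := dom_char_lt ch h
  have := lowerChar_fin ⟨ch.toNat, hlt⟩
  rwa [Char.ofNat_toNat] at this

-- core: if s cannot be a single ASCII-uppercase char (and a single char is < 127),
-- A's dict lookup equals B's closed form
lemma core_eq (s : String)
    (hch : ∀ ch, s.toList = [ch] → ch.toNat < 127 ∧ ¬(65 ≤ ch.toNat ∧ ch.toNat ≤ 90)) :
    pvDictA.getD s s =
    (if PySem.Str.len s = 1 ∧ 'a' ≤ s.toList.headD 'a' ∧ s.toList.headD 'a' ≤ 'z' then
        String.ofList [Char.ofNat (0x24D0 + (s.toList.headD 'a').toNat - 97)]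
      else s) := by
  by_cases hcond : PySem.Str.len s = 1 ∧ 'a' ≤ s.toList.headD 'a' ∧ s.toList.headD 'a' ≤ 'z'
  · rw [if_pos hcond]
    obtain ⟨h1, h2, h3⟩ := hcond
    have hlen : s.toList.length = 1 := by
      rw [PySem.Str.len_eq] at h1; exact_mod_cast h1
    obtain ⟨ch, hl⟩ := List.length_eq_one_iff.mp hlen
    rw [hl] at h2 h3
    simp only [List.headD_cons] at h2 h3
    have h97 : 97 ≤ ch.toNat := (char_le_iff 'a' ch).mp h2
    have h122 : ch.toNat ≤ 122 := (char_le_iff ch 'z').mp h3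
    have hlt := (hch ch hl).1
    have := single_lower_eq ⟨ch.toNat, hlt⟩ h97 h122
    rw [Char.ofNat_toNat] at this
    rw [show s = String.ofList [ch] from by rw [← hl, String.ofList_toList]]
    simpa using this
  · rw [if_neg hcond]
    rcases h : s.toList with _ | ⟨ch, rest⟩
    · exact getD_not_single s (by simp [h])
    rcases rest with _ | ⟨ch2, r2⟩
    · have hc := hch ch h
      have h97 : ¬(97 ≤ ch.toNat ∧ ch.toNat ≤ 122) := by
        rintro ⟨ha, hb⟩
        exact hcond ⟨by simp [PySem.Str.len_eq, h],
          by rw [h]; exact (char_le_iff 'a' ch).mpr ha,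
          by rw [h]; exact (char_le_iff ch 'z').mpr hb⟩
      have := single_other_eq ⟨ch.toNat, hc.1⟩ hc.2 h97
      rw [Char.ofNat_toNat] at this
      rw [show s = String.ofList [ch] from by rw [← h, String.ofList_toList]]
      exact this
    · exact getD_not_single s (by simp [h])

theorem format_s_precomposed_py_spec_aux (c : String)
    (hDom : Dom_format_s_precomposed_py c) :
    format_s_precomposed_py c = format_s_precomposed_py_alt c := by
  unfold format_s_precomposed_py format_s_precomposed_py_alt
  show pvDictA.getD _ _ = _
  have hDom' : pvDomStr c = true := hDom
  by_cases hu : pyStrIsupper c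
  · rw [if_pos hu]
    have hch : ∀ ch, (PySem.Str.lower c).toList = [ch] →
        ch.toNat < 127 ∧ ¬(65 ≤ ch.toNat ∧ ch.toNat ≤ 90) := by
      intro ch heq
      have hm : ch ∈ (PySem.Str.lower c).toList := by rw [heq]; simp
      rw [PySem.Str.toList_lower] at hm
      have hl : PySem.Chars.lower c.toList = c.toList.map PySem.Chars.lowerChar := rfl
      rw [hl] at hm
      obtain ⟨ch0, hm0, rfl⟩ := List.mem_map.mp hm
      have hd : pvDomChar ch0 = true := by
        simp only [pvDomStr, List.all_eq_true] at hDom'; exact hDom' ch0 hm0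
      exact lowerChar_facts ch0 hd
    exact core_eq _ hch
  · rw [if_neg hu]
    have hch : ∀ ch, c.toList = [ch] →
        ch.toNat < 127 ∧ ¬(65 ≤ ch.toNat ∧ ch.toNat ≤ 90) := by
      intro ch heq
      have hd : pvDomChar ch = true := by
        simp only [pvDomStr, List.all_eq_true] at hDom'
        exact hDom' ch (by rw [heq]; simp)
      refine ⟨dom_char_lt ch hd, ?_⟩
      rintro ⟨h1, h2⟩
      -- ch is an ASCII uppercase letter and c is the singleton [ch]: c.isupper() would hold
      apply hu
      unfold pyStrIsupper
      rw [heq]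
      have := upper_isupper ⟨ch.toNat, dom_char_lt ch hd⟩ h1 h2
      rw [Char.ofNat_toNat] at this
      simpa using this
    exact core_eq _ hch

-- ===== VERDICT (by name: the statement is the Claim_ definition above) =====
theorem format_s_precomposed_py_spec : Claim_equal_format_s_precomposed_py := by
  intro c hDom
  exact format_s_precomposed_py_spec_aux c hDom
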